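-- pv_equiv track=rewrite | github.com/chian/solr_reasoning | bvbrc_p3tools_server.py | parse_p3_output
-- ===== SOURCE A (Python) =====
-- def parse_p3_output(output):
--     """Parse p3-tools output, filtering out welcome messages and headers"""
--     lines = output.strip().split('\n')
--
--     # Filter out welcome message and non-data lines
--     data_lines = []
--     found_header = False
--
--     for line in lines:
--         # Skip welcome messages
--         if "Welcome to the BV-BRC" in line:
--             continue
--
--         # Skip empty lines
--         if not line.strip():
--             continue
--
--         # Look for TSV header (contains dots like genome.genome_id)
--         if not found_header and ('genome.' in line or '\t' in line):
--             # This is likely the header row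
--             headers = line.split('\t')
--             found_header = True
--             continue
--
--         # This is actual data
--         if found_header:
--             data_lines.append(line)
--
--     return data_lines
-- ===== SOURCE B (Python) =====
-- def parse_p3_output(output):
--     """Filter/index/slice pipeline: keep non-welcome, non-blank lines, then
--     return everything after the first header-looking line (or [] if none)."""
--     filtered = [l for l in output.strip().split('\n')
--                 if "Welcome to the BV-BRC" not in l and l.strip()]
--     idx = next((i for i, l in enumerate(filtered)
--                 if "genome." in l or "\t" in l), None)
--     return [] if idx is None else filtered[idx + 1:]
-- ===== Notes on version B (the rewrite author's own statement) =====
-- stated objective: simpler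
-- what changed: Replaces the stateful found_header accumulator loop with a three-phase filter/index/slice pipeline: filter out welcome and blank lines, find the index of the first header-looking line, return the slice after it (or [] if none).
import Mathlib
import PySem

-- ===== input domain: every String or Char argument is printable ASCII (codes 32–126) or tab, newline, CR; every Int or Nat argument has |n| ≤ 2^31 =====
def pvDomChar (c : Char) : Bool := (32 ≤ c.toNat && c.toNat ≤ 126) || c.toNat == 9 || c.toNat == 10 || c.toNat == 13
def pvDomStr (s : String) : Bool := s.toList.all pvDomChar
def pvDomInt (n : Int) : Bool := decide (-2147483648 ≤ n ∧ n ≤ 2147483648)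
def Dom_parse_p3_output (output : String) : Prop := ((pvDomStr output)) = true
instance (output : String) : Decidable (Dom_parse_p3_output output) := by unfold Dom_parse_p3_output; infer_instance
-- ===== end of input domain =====

-- B replaces A's stateful found_header loop by a filter / find-index / slice pipeline (objective: simpler).

-- ===== PORT A =====
-- one iteration of A's loop; state = (found_header, data_lines)
def parseP3Step (st : Bool × List String) (line : String) : Bool × List String :=
  if PySem.Str.isIn "Welcome to the BV-BRC" line then st
  else if PySem.Str.strip line = "" then st
  else if !st.1 && (PySem.Str.isIn "genome." line || PySem.Str.isIn "\t" line) then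
    (true, st.2)   -- header row found (A computes headers = line.split('\t') but never uses it)
  else if st.1 then (st.1, st.2 ++ [line])
  else st

def parse_p3_output (output : String) : List String :=
  -- '\n' is a nonempty separator, so Python's split never raises: split? is always some
  let lines := (PySem.Str.split? (PySem.Str.strip output) "\n").getD []
  (lines.foldl parseP3Step (false, [])).2

-- ===== PORT B =====
def parseP3Keep (l : String) : Bool :=
  !PySem.Str.isIn "Welcome to the BV-BRC" l && !(PySem.Str.strip l == "")

def parseP3IsHeader (l : String) : Bool :=
  PySem.Str.isIn "genome." l || PySem.Str.isIn "\t" l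

def parse_p3_output_alt (output : String) : List String :=
  let filtered := ((PySem.Str.split? (PySem.Str.strip output) "\n").getD []).filter parseP3Keep
  (filtered.findIdx? parseP3IsHeader).elim [] (fun i => filtered.drop (i + 1))

-- ===== PRECONDITION & SPEC =====
def Spec_parse_p3_output (output : String) (out : List String) : Prop := out = parse_p3_output_alt output
instance (output : String) (out : List String) : Decidable (Spec_parse_p3_output output out) := by unfold Spec_parse_p3_output; infer_instance

-- ===== CLAIM (what is proved, stated in full; the proofs are below) =====
def Claim_equal_parse_p3_output : Prop := ∀ (output : String), Dom_parse_p3_output output → Spec_parse_p3_output output (parse_p3_output output)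

-- ===== LEMMAS AND PROOFS =====

theorem parseP3Keep_eq_false_of_welcome {l : String}
    (hw : PySem.Str.isIn "Welcome to the BV-BRC" l = true) : parseP3Keep l = false := by
  simp only [parseP3Keep, hw, Bool.not_true, Bool.false_and]

theorem parseP3Keep_eq_false_of_blank {l : String}
    (hb : PySem.Str.strip l = "") : parseP3Keep l = false := by
  simp only [parseP3Keep, hb, beq_self_eq_true, Bool.not_true, Bool.and_false]

theorem parseP3Keep_eq_true {l : String}
    (hw : ¬ PySem.Str.isIn "Welcome to the BV-BRC" l = true)
    (hb : ¬ PySem.Str.strip l = "") : parseP3Keep l = true := by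
  simp only [parseP3Keep, Bool.and_eq_true, Bool.not_eq_eq_eq_not, Bool.not_true]
  exact ⟨by simpa using hw, by simpa using hb⟩

-- once the header is found, A's loop simply appends every kept line
theorem parseP3_foldl_found (ls : List String) (acc : List String) :
    ls.foldl parseP3Step (true, acc) = (true, acc ++ ls.filter parseP3Keep) := by
  induction ls generalizing acc with
  | nil => simp
  | cons hd tl ih =>
    simp only [List.foldl_cons, List.filter_cons, parseP3Step]
    by_cases hw : PySem.Str.isIn "Welcome to the BV-BRC" hd = true
    · rw [if_pos hw, parseP3Keep_eq_false_of_welcome hw, ih]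
      simp
    · rw [if_neg hw]
      by_cases hb : PySem.Str.strip hd = ""
      · rw [if_pos hb, parseP3Keep_eq_false_of_blank hb, ih]
        simp
      · rw [if_neg hb, parseP3Keep_eq_true hw hb]
        simp [ih]

-- before the header is found, A's loop equals B's find-index/slice on the kept lines
theorem parseP3_foldl_unfound (ls : List String) :
    (ls.foldl parseP3Step (false, [])).2 =
      ((ls.filter parseP3Keep).findIdx? parseP3IsHeader).elim []
        (fun i => (ls.filter parseP3Keep).drop (i + 1)) := by
  induction ls with
  | nil => simp
  | cons hd tl ih =>
    simp only [List.foldl_cons, List.filter_cons, parseP3Step]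
    by_cases hw : PySem.Str.isIn "Welcome to the BV-BRC" hd = true
    · rw [if_pos hw, parseP3Keep_eq_false_of_welcome hw]
      simpa using ih
    · rw [if_neg hw]
      by_cases hb : PySem.Str.strip hd = ""
      · rw [if_pos hb, parseP3Keep_eq_false_of_blank hb]
        simpa using ih
      · rw [if_neg hb, parseP3Keep_eq_true hw hb]
        simp only [if_true, Bool.not_false, Bool.true_and]
        by_cases hh : parseP3IsHeader hd = true
        · have hh' := hh
          simp only [parseP3IsHeader] at hh'
          have hfi : (hd :: tl.filter parseP3Keep).findIdx? parseP3IsHeader = some 0 := by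
            rw [List.findIdx?_cons]; simp [hh]
          rw [if_pos hh', parseP3_foldl_found, hfi]
          simp [Option.elim]
        · have hh' := hh
          simp only [parseP3IsHeader] at hh'
          have hhf : parseP3IsHeader hd = false := by simpa using hh
          have hfi : (hd :: tl.filter parseP3Keep).findIdx? parseP3IsHeader =
              ((tl.filter parseP3Keep).findIdx? parseP3IsHeader).map (· + 1) := by
            rw [List.findIdx?_cons, hhf]; simp
          rw [if_neg hh']
          simp only [Bool.false_eq_true, if_false]
          rw [ih, hfi]
          cases h : (tl.filter parseP3Keep).findIdx? parseP3IsHeader with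
          | none => simp
          | some i => simp only [Option.map_some, Option.elim_some, List.drop_succ_cons]

-- ===== VERDICT (by name: the statement is the Claim_ definition above) =====
theorem parse_p3_output_spec : Claim_equal_parse_p3_output := by
  intro output _
  unfold Spec_parse_p3_output parse_p3_output parse_p3_output_alt
  exact parseP3_foldl_unfound _
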